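-- pv_equiv track=rewrite | github.com/ChanghyunRyu/Python-CodingTest-note | brute_force/rogue_user/rogue_user.py | solution
-- ===== SOURCE A (Python) =====
-- def solution(user_id, banned_id):
--     stack = [([], 0, user_id)]
--     result = []
--     while stack:
--         result_list, index, user_list = stack.pop()
--         if index == len(banned_id):
--             result_list.sort()
--             if result_list not in result:
--                 result.append(result_list)
--             continue
--         for user in user_list:
--             if check_id(banned_id[index], user):
--                 next_result_list = list(result_list)
--                 next_result_list.append(user)
--                 next_user_list = list(user_list)
--                 next_user_list.remove(user)
--                 stack.append((next_result_list, index+1, next_user_list))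
--     return len(result)
--
-- def check_id(ban_id, chk_id):
--     if len(ban_id) != len(chk_id):
--         return False
--     for i in range(len(ban_id)):
--         if ban_id[i] == '*':
--             continue
--         if ban_id[i] != chk_id[i]:
--             return False
--     return True
-- ===== SOURCE B (Python) =====
-- def check_id(ban_id, chk_id):
--     return len(ban_id) == len(chk_id) and all(b == '*' or b == c for b, c in zip(ban_id, chk_id))
--
-- def solution(user_id, banned_id):
--     n = len(user_id)
--     cands = [[i for i in range(n) if check_id(b, user_id[i])] for b in banned_id]
--     combos = [[]]
--     for cand in cands:
--         combos = [c + [i] for c in combos for i in cand if i not in c]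
--     return len({tuple(sorted(user_id[i] for i in c)) for c in combos})
-- ===== Notes on version B (the rewrite author's own statement) =====
-- stated objective: alternative
-- what changed: Replaced the explicit-stack DFS that removes used users from a copied list and dedups by linear membership in a result list with: a precomputed per-pattern candidate-index table (check_id evaluated once per pattern/user pair), a fold building cartesian-product index combinations kept only when indices are distinct, and hash-set dedup of the sorted user tuples.
import Mathlib
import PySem

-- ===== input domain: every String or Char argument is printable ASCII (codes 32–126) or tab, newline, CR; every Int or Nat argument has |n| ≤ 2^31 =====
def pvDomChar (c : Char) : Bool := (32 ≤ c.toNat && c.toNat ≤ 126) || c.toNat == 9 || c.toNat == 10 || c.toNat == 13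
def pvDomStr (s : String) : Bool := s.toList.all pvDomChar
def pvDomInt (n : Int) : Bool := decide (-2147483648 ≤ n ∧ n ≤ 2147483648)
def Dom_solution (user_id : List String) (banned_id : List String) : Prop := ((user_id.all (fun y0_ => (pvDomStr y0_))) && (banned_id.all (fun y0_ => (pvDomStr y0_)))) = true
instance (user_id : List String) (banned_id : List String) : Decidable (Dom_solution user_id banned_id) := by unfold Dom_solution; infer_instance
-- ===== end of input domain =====

-- B replaces A's explicit-stack DFS (user removal + linear list dedup) by a precomputed
-- candidate-index table, a fold over patterns building distinct-index combinations, and a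
-- set of sorted user tuples instead of A's linear result-list dedup scans; objective:
-- an alternative algorithm of similar cost. Return-value equivalence only (A mutates only
-- its own local lists, not its arguments).

-- ===== PORT A =====
-- check_id: index loop with early return, transliterated as recursion on i
def checkIdLoop (ban chk : List Char) (i : Nat) : Bool :=
  if h : i < ban.length then
    if ban[i] = '*' then checkIdLoop ban chk (i + 1)
    else if ban[i] ≠ chk.getD i ' ' then false
    else checkIdLoop ban chk (i + 1)
  else true
termination_by ban.length - i

def checkId (ban chk : String) : Bool :=
  if ban.toList.length ≠ chk.toList.length then false
  else checkIdLoop ban.toList chk.toList 0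

-- weight for termination of the while-stack loop
def pvW : Nat → Nat → Nat
  | _, 0 => 1
  | u, d + 1 => 1 + u * pvW (u - 1) d

theorem pvW_pos (u d : Nat) : 0 < pvW u d := by
  cases d <;> simp [pvW]

-- the items pushed by the inner `for user in user_list` loop (in iteration order)
def pvPush (pat : String) (rl : List String) (idx : Nat) (ul : List String) :
    List (List String × Nat × List String) :=
  ul.filterMap (fun u =>
    -- Python: next_user_list.remove(user); user ∈ user_list here, so list.remove = List.erase
    if checkId pat u then some (rl ++ [u], idx + 1, ul.erase u) else none)

theorem pvPush_sum (L : Nat) (pat : String) (rl : List String) (idx : Nat) (ul : List String) :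
    ((pvPush pat rl idx ul).map (fun it => pvW it.2.2.length (L - it.2.1))).sum
      ≤ ul.length * pvW (ul.length - 1) (L - (idx + 1)) := by
  have hmem : ∀ x ∈ (pvPush pat rl idx ul).map (fun it => pvW it.2.2.length (L - it.2.1)),
      x ≤ pvW (ul.length - 1) (L - (idx + 1)) := by
    intro x hx
    simp only [List.mem_map, pvPush, List.mem_filterMap] at hx
    obtain ⟨it, ⟨u, hu, hit⟩, rfl⟩ := hx
    split at hit
    · cases hit.symm
      simp [List.length_erase_of_mem hu]
    · cases hit
  calc ((pvPush pat rl idx ul).map (fun it => pvW it.2.2.length (L - it.2.1))).sum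
      ≤ ((pvPush pat rl idx ul).map (fun it => pvW it.2.2.length (L - it.2.1))).length •
          pvW (ul.length - 1) (L - (idx + 1)) := List.sum_le_card_nsmul _ _ hmem
    _ ≤ ul.length * pvW (ul.length - 1) (L - (idx + 1)) := by
        simp only [List.length_map, smul_eq_mul]
        exact Nat.mul_le_mul_right _ (List.length_filterMap_le _ _)

-- while stack: loop of A; stack kept in pop order (head = Python's last element)
def aLoop (banned : List String) :
    List (List String × Nat × List String) → List (List String) → List (List String)
  | [], result => result
  | (rl, idx, ul) :: rest, result =>
    if idx = banned.length then
      let s := PySem.List.sorted rl (fun x => x) false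
      aLoop banned rest (if s ∈ result then result else result ++ [s])
    else if hlt : idx < banned.length then
      aLoop banned ((pvPush (banned.getD idx "") rl idx ul).reverse ++ rest) result
    else
      -- unreachable from solution's initial stack: Python's banned_id[index] would raise
      aLoop banned rest result
termination_by stack _ => (stack.map (fun it => pvW it.2.2.length (banned.length - it.2.1))).sum
decreasing_by
  · simp only [List.map_cons, List.sum_cons]
    have := pvW_pos ul.length (banned.length - idx)
    omega
  · simp only [List.map_cons, List.sum_cons, List.map_append, List.sum_append,
      List.map_reverse, List.sum_reverse]
    have h1 := pvPush_sum banned.length (banned.getD idx "") rl idx ul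
    have h2 : banned.length - idx = (banned.length - (idx + 1)) + 1 := by omega
    have h3 : pvW ul.length (banned.length - idx)
        = 1 + ul.length * pvW (ul.length - 1) (banned.length - (idx + 1)) := by
      rw [h2]; rfl
    omega
  · simp only [List.map_cons, List.sum_cons]
    have := pvW_pos ul.length (banned.length - idx)
    omega

def solution (user_id : List String) (banned_id : List String) : Int :=
  ((aLoop banned_id [([], 0, user_id)] []).length : Int)

-- ===== PORT B =====
def checkIdAlt (ban chk : String) : Bool :=
  ban.toList.length == chk.toList.length &&
    (ban.toList.zip chk.toList).all (fun p => p.1 == '*' || p.1 == p.2)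

def solution_alt (user_id : List String) (banned_id : List String) : Int :=
  let n := user_id.length
  let cands := banned_id.map (fun b =>
    (List.range n).filter (fun i => checkIdAlt b (user_id.getD i "")))
  let combos := cands.foldl (fun combos cand =>
    combos.flatMap (fun c =>
      cand.filterMap (fun i => if i ∈ c then none else some (c ++ [i])))) [[]]
  ((PySem.Set.ofList (combos.map (fun c =>
      PySem.List.sorted (c.map (fun i => user_id.getD i "")) (fun x => x) false))).length : Int)

-- ===== PRECONDITION & SPEC =====
def Spec_solution (user_id : List String) (banned_id : List String) (out : Int) : Prop := out = solution_alt user_id banned_id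
instance (user_id : List String) (banned_id : List String) (out : Int) : Decidable (Spec_solution user_id banned_id out) := by unfold Spec_solution; infer_instance

-- ===== CLAIM (what is proved, stated in full; the proofs are below) =====
def Claim_equal_solution : Prop := ∀ (user_id : List String) (banned_id : List String), Dom_solution user_id banned_id → Spec_solution user_id banned_id (solution user_id banned_id)

-- ===== LEMMAS AND PROOFS =====

-- dedup-insert used by A's `if result_list not in result: result.append(result_list)`
def pvIns (r : List (List String)) (s : List String) : List (List String) :=
  if s ∈ r then r else r ++ [s]

-- completions of a DFS item: the result_list suffixes it can still produce, in A's order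
def pvComps : List String → List String → List (List String)
  | [], _ => [[]]
  | p :: ps, ul =>
    ((ul.filter (fun u => checkId p u)).reverse).flatMap
      (fun u => (pvComps ps (ul.erase u)).map (u :: ·))

def pvContrib (banned : List String) (it : List String × Nat × List String) : List (List String) :=
  (pvComps (banned.drop it.2.1) it.2.2).map
    (fun c => PySem.List.sorted (it.1 ++ c) (fun x => x) false)

-- selection of users matching the patterns, from a multiset of available users
def pvSelM : List String → Multiset String → List String → Prop
  | [], _, us => us = []
  | p :: ps, m, us => ∃ u t, us = u :: t ∧ u ∈ m ∧ checkId p u = true ∧ pvSelM ps (m.erase u) t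

-- extension of a prefix of used indices through the candidate lists
def pvExtSel : List Nat → List (List Nat) → List Nat → Prop
  | _, [], e => e = []
  | pre, cand :: cs, e => ∃ i t, e = i :: t ∧ i ∈ cand ∧ i ∉ pre ∧ pvExtSel (pre ++ [i]) cs t

def pvStep (acc : List (List Nat)) (cand : List Nat) : List (List Nat) :=
  acc.flatMap (fun c => cand.filterMap (fun i => if i ∈ c then none else some (c ++ [i])))

theorem pvFilterMap_if {α β : Type} (p : α → Bool) (f : α → β) (l : List α) :
    l.filterMap (fun u => if p u then some (f u) else none) = (l.filter p).map f := by
  induction l with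
  | nil => rfl
  | cons x xs ih => by_cases h : p x <;> simp [h, ih]

theorem checkIdLoop_eq (b d : List Char) (h : b.length = d.length) (k : Nat) :
    ∀ i, b.length - i ≤ k →
    checkIdLoop b d i = ((b.drop i).zip (d.drop i)).all (fun p => p.1 == '*' || p.1 == p.2) := by
  induction k with
  | zero =>
    intro i hk
    rw [checkIdLoop]
    have h1 : ¬ i < b.length := by omega
    simp [h1, List.drop_eq_nil_of_le (by omega : b.length ≤ i),
      List.drop_eq_nil_of_le (by omega : d.length ≤ i)]
  | succ n ih =>
    intro i hk
    rw [checkIdLoop]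
    by_cases hlt : i < b.length
    · have hc : i < d.length := by omega
      rw [List.drop_eq_getElem_cons hlt, List.drop_eq_getElem_cons hc]
      have hgd : d[i]? = some d[i] := List.getElem?_eq_getElem hc
      simp only [hlt, dite_true, List.getD, hgd, Option.getD_some, List.zip_cons_cons, List.all_cons]
      by_cases hstar : b[i] = '*'
      · simp [hstar, ih (i+1) (by omega)]
      · by_cases heq : b[i] = d[i]
        · simp [hstar, heq, ih (i + 1) (by omega)]
        · simp [hstar, heq]
    · have h1 : ¬ i < b.length := hlt
      simp [h1, List.drop_eq_nil_of_le (by omega : b.length ≤ i),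
        List.drop_eq_nil_of_le (by omega : d.length ≤ i)]


theorem checkId_eq_alt (x y : String) : checkId x y = checkIdAlt x y := by
  unfold checkId checkIdAlt
  by_cases h : x.toList.length = y.toList.length
  · have := checkIdLoop_eq x.toList y.toList h x.toList.length 0 (by omega)
    simp [h, this]
  · rw [if_pos h]
    have h2 : (x.toList.length == y.toList.length) = false := by simpa using h
    rw [h2, Bool.false_and]

theorem pvIns_fold (xs : List (List String)) :
    ∀ acc : List (List String), acc.Nodup →
    (xs.foldl pvIns acc).Nodup ∧ (xs.foldl pvIns acc).toFinset = acc.toFinset ∪ xs.toFinset := by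
  induction xs with
  | nil => intro acc h; simp [h]
  | cons x xs ih =>
    intro acc h
    have hnd : (pvIns acc x).Nodup := by
      by_cases hx : x ∈ acc
      · simpa [pvIns, hx] using h
      · simp only [pvIns, if_neg hx]
        exact List.Nodup.append h (List.nodup_singleton x)
          (by simpa [List.disjoint_singleton] using hx)
    have hfin : (pvIns acc x).toFinset = insert x acc.toFinset := by
      by_cases hx : x ∈ acc
      · simp [pvIns, hx, Finset.insert_eq_self.mpr (List.mem_toFinset.mpr hx)]
      · simp only [pvIns, if_neg hx]
        ext y; simp
    obtain ⟨h1, h2⟩ := ih (pvIns acc x) hnd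
    refine ⟨h1, ?_⟩
    simp only [List.foldl_cons] at *
    rw [h2, hfin, List.toFinset_cons, Finset.insert_union, Finset.union_insert]

theorem pvIns_count (xs : List (List String)) :
    (xs.foldl pvIns []).length = xs.toFinset.card := by
  obtain ⟨h1, h2⟩ := pvIns_fold xs [] List.nodup_nil
  rw [← List.toFinset_card_of_nodup h1, h2]
  simp



theorem mem_pvComps (ps : List String) : ∀ (ul us : List String),
    us ∈ pvComps ps ul ↔ pvSelM ps (↑ul) us := by
  induction ps with
  | nil => intro ul us; simp [pvComps, pvSelM]
  | cons p ps ih =>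
    intro ul us
    simp only [pvComps, pvSelM, List.mem_flatMap, List.mem_reverse, List.mem_filter,
      List.mem_map]
    constructor
    · rintro ⟨u, ⟨hu, hchk⟩, t, ht, rfl⟩
      exact ⟨u, t, rfl, by exact_mod_cast hu, hchk, by
        rw [Multiset.coe_erase]; exact (ih _ _).mp ht⟩
    · rintro ⟨u, t, rfl, hu, hchk, hsel⟩
      refine ⟨u, ⟨by exact_mod_cast hu, hchk⟩, t, ?_, rfl⟩
      exact (ih _ _).mpr (by rwa [Multiset.coe_erase] at hsel)


theorem mem_pvStep (acc : List (List Nat)) (cand : List Nat) (c1 : List Nat) :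
    c1 ∈ pvStep acc cand ↔ ∃ c0 ∈ acc, ∃ i, i ∈ cand ∧ i ∉ c0 ∧ c1 = c0 ++ [i] := by
  simp only [pvStep, List.mem_flatMap, List.mem_filterMap]
  constructor
  · rintro ⟨c0, hc0, i, hi, hsome⟩
    split at hsome
    · cases hsome
    · exact ⟨c0, hc0, i, hi, by assumption, (Option.some_inj.mp hsome).symm⟩
  · rintro ⟨c0, hc0, i, hi, hni, rfl⟩
    exact ⟨c0, hc0, i, hi, by simp [hni]⟩

theorem mem_foldl_pvStep (cs : List (List Nat)) :
    ∀ (acc : List (List Nat)) (x : List Nat),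
    x ∈ cs.foldl pvStep acc ↔ ∃ c0 ∈ acc, ∃ e, pvExtSel c0 cs e ∧ x = c0 ++ e := by
  induction cs with
  | nil => intro acc x; simp [pvExtSel]
  | cons cand cs ih =>
    intro acc x
    rw [List.foldl_cons, ih]
    constructor
    · rintro ⟨c1, hc1, e, he, rfl⟩
      obtain ⟨c0, hc0, i, hi, hni, rfl⟩ := (mem_pvStep acc cand c1).mp hc1
      exact ⟨c0, hc0, i :: e, ⟨i, e, rfl, hi, hni, he⟩, by simp⟩
    · rintro ⟨c0, hc0, e, ⟨i, t, rfl, hi, hni, ht⟩, rfl⟩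
      exact ⟨c0 ++ [i], (mem_pvStep acc cand _).mpr ⟨c0, hc0, i, hi, hni, rfl⟩,
        t, ht, by simp⟩
theorem pvErase (user : List String) (pre : List Nat) (i : Nat)
    (hi : i ∈ (List.range user.length).filter (fun j => j ∉ pre)) :
    (↑(((List.range user.length).filter (fun j => j ∉ pre)).map (fun j => user.getD j "")) : Multiset String).erase (user.getD i "")
    = ↑(((List.range user.length).filter (fun j => j ∉ pre ++ [i])).map (fun j => user.getD j "")) := by
  set R := (List.range user.length).filter (fun j => j ∉ pre) with hR
  have hnd : R.Nodup := List.Nodup.filter _ List.nodup_range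
  have hperm : (R.map (fun j => user.getD j "")).Perm
      (user.getD i "" :: (R.erase i).map (fun j => user.getD j "")) := by
    simpa using (List.perm_cons_erase hi).map (fun j => user.getD j "")
  rw [Multiset.coe_eq_coe.mpr hperm, ← Multiset.cons_coe, Multiset.erase_cons_head, Multiset.coe_eq_coe]
  have hfe : R.erase i = (List.range user.length).filter (fun j => j ∉ pre ++ [i]) := by
    rw [hnd.erase_eq_filter, hR, List.filter_filter]
    apply List.filter_congr
    intro j hj
    by_cases hji : j = i <;> simp [List.mem_append, bne, hji]
  rw [hfe]
theorem pvBridge (user : List String) (ps : List String) :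
    ∀ (pre : List Nat), pre.Nodup → ∀ us : List String,
    pvSelM ps (↑(((List.range user.length).filter (fun j => j ∉ pre)).map
        (fun j => user.getD j ""))) us ↔
      ∃ e, pvExtSel pre (ps.map (fun p =>
          (List.range user.length).filter (fun i => checkIdAlt p (user.getD i "")))) e ∧
        e.map (fun j => user.getD j "") = us := by
  induction ps with
  | nil => intro pre hnd us; simp [pvSelM, pvExtSel, eq_comm]
  | cons p ps ih =>
    intro pre hnd us
    simp only [pvSelM, List.map_cons, pvExtSel]
    constructor
    · rintro ⟨u, t, rfl, hu, hchk, hsel⟩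
      rw [Multiset.mem_coe, List.mem_map] at hu
      obtain ⟨i, hiR, rfl⟩ := hu
      have hiR' := hiR
      rw [List.mem_filter, List.mem_range] at hiR'
      obtain ⟨hin, hnpre⟩ := hiR'
      have hnpre : i ∉ pre := by simpa using hnpre
      have hnd' : (pre ++ [i]).Nodup := by
        simp only [List.nodup_append, List.nodup_singleton, List.mem_singleton]
        exact ⟨hnd, trivial, fun a ha b hb => by rintro rfl; rw [hb] at ha; exact hnpre ha⟩
      rw [pvErase user pre i hiR] at hsel
      obtain ⟨e, hext, hmap⟩ := (ih (pre ++ [i]) hnd' t).mp hsel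
      refine ⟨i :: e, ⟨i, e, rfl, ?_, hnpre, hext⟩, by simp only [List.map_cons, hmap]⟩
      rw [List.mem_filter, List.mem_range]
      exact ⟨hin, by rw [← checkId_eq_alt]; exact hchk⟩
    · rintro ⟨e, ⟨i, t, rfl, hic, hnpre, hext⟩, rfl⟩
      rw [List.mem_filter, List.mem_range] at hic
      obtain ⟨hin, hchk⟩ := hic
      have hiR : i ∈ (List.range user.length).filter (fun j => j ∉ pre) := by
        rw [List.mem_filter, List.mem_range]; simp [hin, hnpre]
      refine ⟨user.getD i "", t.map (fun j => user.getD j ""), by simp, ?_,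
        by rw [checkId_eq_alt]; exact hchk, ?_⟩
      · rw [Multiset.mem_coe, List.mem_map]; exact ⟨i, hiR, rfl⟩
      · have hnd' : (pre ++ [i]).Nodup := by
          simp only [List.nodup_append, List.nodup_singleton, List.mem_singleton]
          exact ⟨hnd, trivial, fun a ha b hb => by rintro rfl; rw [hb] at ha; exact hnpre ha⟩
        rw [pvErase user pre i hiR]
        exact (ih (pre ++ [i]) hnd' _).mpr ⟨t, hext, rfl⟩

theorem aLoop_eq (banned : List String) :
    ∀ (stack : List (List String × Nat × List String)) (result : List (List String)),
    (∀ it ∈ stack, it.2.1 ≤ banned.length) →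
    aLoop banned stack result = (stack.flatMap (pvContrib banned)).foldl pvIns result := by
  intro stack result
  induction stack, result using aLoop.induct banned with
  | case1 result => intro _; simp [aLoop]
  | case2 rl ulist srest res s ih =>
    intro h
    rw [aLoop]
    simp only [if_pos rfl]
    have hc : pvContrib banned (rl, banned.length, ulist)
        = [PySem.List.sorted rl (fun x => x) false] := by
      simp [pvContrib, List.drop_length, pvComps]
    rw [List.flatMap_cons, hc, List.singleton_append, List.foldl_cons]
    simp only [dite_eq_ite] at ih
    exact ih (fun it hit => h it (List.mem_cons_of_mem _ hit))
  | case3 rl idx ul rest res h hlt ih =>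
    intro hst
    rw [aLoop]
    simp only [if_neg h, dif_pos hlt]
    have hpush : ∀ it ∈ (pvPush (banned.getD idx "") rl idx ul).reverse ++ rest,
        it.2.1 ≤ banned.length := by
      intro it hit
      rcases List.mem_append.mp hit with hit | hit
      · rw [List.mem_reverse, pvPush, List.mem_filterMap] at hit
        obtain ⟨u, hu, hsome⟩ := hit
        split at hsome
        · cases hsome; simpa using hlt
        · cases hsome
      · exact hst it (List.mem_cons_of_mem _ hit)
    rw [ih hpush]
    have key : ((pvPush (banned.getD idx "") rl idx ul).reverse).flatMap (pvContrib banned)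
        = pvContrib banned (rl, idx, ul) := by
      rw [pvPush, pvFilterMap_if]
      conv_rhs => rw [pvContrib]
      simp only [List.drop_eq_getElem_cons hlt, pvComps,
        List.getD_eq_getElem banned "" hlt]
      rw [List.map_flatMap, ← List.map_reverse, List.flatMap_map]
      simp [pvContrib, List.map_map, Function.comp_def, List.append_assoc]
    rw [List.flatMap_append, key, ← List.flatMap_cons]
  | case4 rl idx ul rest res h hlt ih =>
    intro hst
    have h1 := hst (rl, idx, ul) List.mem_cons_self
    simp only at h1
    omega

theorem pvSetLen (ys : List (List String)) :
    (PySem.Set.ofList ys).length = ys.toFinset.card := by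
  rw [← List.toFinset_card_of_nodup (PySem.Set.nodup_ofList (xs := ys))]
  congr 1
  ext y
  simp [PySem.Set.mem_ofList]

-- ===== VERDICT (by name: the statement is the Claim_ definition above) =====
theorem pvUser (user : List String) :
    (((List.range user.length).filter (fun j => j ∉ ([] : List Nat))).map
      (fun j => user.getD j "")) = user := by
  have h1 : (List.range user.length).filter (fun j => decide (j ∉ ([] : List Nat)))
      = List.range user.length := by simp
  rw [h1]
  apply List.ext_getElem (by simp)
  intro k h2 h3
  simp [List.getElem?_eq_getElem h3]

theorem solution_spec : Claim_equal_solution := by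
  unfold Claim_equal_solution Spec_solution
  intro user banned _
  have hA : aLoop banned [([], 0, user)] []
      = ((pvComps banned user).map (fun c => PySem.List.sorted c (fun x => x) false)).foldl
          pvIns [] := by
    rw [aLoop_eq banned _ _ (by intro it hit; simp only [List.mem_singleton] at hit; subst hit; simp)]
    simp [pvContrib]
  have hset : ((pvComps banned user).map (fun c => PySem.List.sorted c (fun x => x) false)).toFinset
      = (((banned.map (fun b => (List.range user.length).filter
            (fun i => checkIdAlt b (user.getD i "")))).foldl pvStep [[]]).map
          (fun c => PySem.List.sorted (c.map (fun i => user.getD i "")) (fun x => x) false)).toFinset := by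
    ext v
    simp only [List.mem_toFinset, List.mem_map]
    constructor
    · rintro ⟨us, hus, rfl⟩
      have hsel := (mem_pvComps banned user us).mp hus
      rw [← pvUser user] at hsel
      obtain ⟨e, hext, hmap⟩ := (pvBridge user banned [] List.nodup_nil us).mp hsel
      refine ⟨e, ?_, by rw [hmap]⟩
      rw [mem_foldl_pvStep]
      exact ⟨[], by simp, e, hext, by simp⟩
    · rintro ⟨c, hc, rfl⟩
      rw [mem_foldl_pvStep] at hc
      obtain ⟨c0, hc0, e, hext, rfl⟩ := hc
      simp only [List.mem_singleton] at hc0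
      subst hc0
      have hsel := (pvBridge user banned [] List.nodup_nil _).mpr ⟨e, hext, rfl⟩
      rw [pvUser user] at hsel
      exact ⟨_, (mem_pvComps banned user _).mpr hsel, by rw [List.nil_append]⟩
  show ((aLoop banned [([], 0, user)] []).length : Int) = solution_alt user banned
  rw [hA, pvIns_count, hset]
  show _ = ((PySem.Set.ofList _).length : Int)
  rw [pvSetLen]
  rfl
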